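-- pv_equiv track=rewrite | github.com/pombredanne/launchpad-3 | lib/lp/app/browser/stringformatter.py | _linkify_url_should_be_ignored
-- ===== SOURCE A (Python) =====
-- def _linkify_url_should_be_ignored(url):
--     """Don't linkify URIs consisting of just the protocol."""
--
--     protocol_bases = [
--         'about',
--         'gopher',
--         'http',
--         'https',
--         'sftp',
--         'news',
--         'ftp',
--         'mailto',
--         'irc',
--         'jabber',
--         'apt',
--         'data',
--         ]
--
--     for base in protocol_bases:
--         if url in ('%s' % base, '%s:' % base, '%s://' % base):
--             return True
--     return False
-- ===== SOURCE B (Python) =====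
-- _PROTOCOL_BASES = frozenset(
--     'about gopher http https sftp news ftp mailto irc jabber apt data'.split())
--
--
-- def _linkify_url_should_be_ignored(url):
--     """Don't linkify URIs consisting of just the protocol."""
--     if url.endswith('://'):
--         url = url[:-3]
--     elif url.endswith(':'):
--         url = url[:-1]
--     return url in _PROTOCOL_BASES
-- ===== Notes on version B (the rewrite author's own statement) =====
-- stated objective: simpler
-- what changed: Replaces the loop that builds three candidate strings per protocol with one suffix normalization ('://' or one trailing ':' stripped) followed by a single frozenset membership test on a set built once at module level.
import Mathlib
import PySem

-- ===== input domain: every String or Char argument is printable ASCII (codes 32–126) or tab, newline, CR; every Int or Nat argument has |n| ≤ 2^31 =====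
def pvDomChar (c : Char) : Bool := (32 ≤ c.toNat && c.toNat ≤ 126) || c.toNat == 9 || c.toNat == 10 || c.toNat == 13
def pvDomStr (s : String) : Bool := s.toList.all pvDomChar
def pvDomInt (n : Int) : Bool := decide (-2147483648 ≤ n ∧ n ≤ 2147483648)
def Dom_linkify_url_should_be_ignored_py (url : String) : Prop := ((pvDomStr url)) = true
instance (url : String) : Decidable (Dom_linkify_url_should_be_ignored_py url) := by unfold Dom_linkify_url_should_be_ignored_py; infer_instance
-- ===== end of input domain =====

-- B replaces A's per-protocol loop over three candidate strings with one suffix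
-- normalization ('://' or one trailing ':' stripped) followed by a single
-- frozenset membership test (simpler).

-- ===== PORT A =====
-- the literal `protocol_bases` list from A, as code-point lists
def pvProtocolBasesA : List (List Char) :=
  [['a', 'b', 'o', 'u', 't'],
   ['g', 'o', 'p', 'h', 'e', 'r'],
   ['h', 't', 't', 'p'],
   ['h', 't', 't', 'p', 's'],
   ['s', 'f', 't', 'p'],
   ['n', 'e', 'w', 's'],
   ['f', 't', 'p'],
   ['m', 'a', 'i', 'l', 't', 'o'],
   ['i', 'r', 'c'],
   ['j', 'a', 'b', 'b', 'e', 'r'],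
   ['a', 'p', 't'],
   ['d', 'a', 't', 'a']]

-- A's loop: for each base, return True if url is base, base+':' or base+'://'
def linkify_url_should_be_ignored_py (url : String) : Bool :=
  pvProtocolBasesA.any (fun base =>
    url.toList == base || url.toList == base ++ [':'] || url.toList == base ++ [':', '/', '/'])

-- ===== PORT B =====
-- B's module-level frozenset, built from one space-separated literal via split()
def pvProtocolSetB : PySem.Set String :=
  PySem.Set.ofList
    (PySem.Str.split₀ "about gopher http https sftp news ftp mailto irc jabber apt data")

def linkify_url_should_be_ignored_py_alt (url : String) : Bool :=
  let t :=
    if PySem.Str.endswith url "://" then PySem.Str.slice url none (some (-3))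
    else if PySem.Str.endswith url ":" then PySem.Str.slice url none (some (-1))
    else url
  PySem.Set.contains pvProtocolSetB t

-- ===== PRECONDITION & SPEC =====
def Spec_linkify_url_should_be_ignored_py (url : String) (out : Bool) : Prop := out = linkify_url_should_be_ignored_py_alt url
instance (url : String) (out : Bool) : Decidable (Spec_linkify_url_should_be_ignored_py url out) := by unfold Spec_linkify_url_should_be_ignored_py; infer_instance

-- ===== CLAIM (what is proved, stated in full; the proofs are below) =====
def Claim_equal_linkify_url_should_be_ignored_py : Prop := ∀ (url : String), Dom_linkify_url_should_be_ignored_py url → Spec_linkify_url_should_be_ignored_py url (linkify_url_should_be_ignored_py url)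

-- ===== LEMMAS AND PROOFS =====

-- no protocol base contains ':' or '/'
theorem pvBases_clean : ∀ b ∈ pvProtocolBasesA, ':' ∉ b ∧ '/' ∉ b := by decide

-- B's frozenset holds exactly the strings whose code points form an element of A's list
theorem pvSet_mem (t : String) :
    PySem.Set.contains pvProtocolSetB t = true ↔ t.toList ∈ pvProtocolBasesA := by
  have h : pvProtocolSetB =
      ["about", "gopher", "http", "https", "sftp", "news", "ftp",
       "mailto", "irc", "jabber", "apt", "data"] := by decide
  rw [h]
  simp only [PySem.Set.contains, List.contains_eq_mem, decide_eq_true_eq,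
    List.mem_cons, List.not_mem_nil, or_false, pvProtocolBasesA]
  constructor
  · rintro (rfl | rfl | rfl | rfl | rfl | rfl | rfl | rfl | rfl | rfl | rfl | rfl) <;> decide
  · intro h'
    have ht : t = String.ofList t.toList := String.ofList_toList.symm
    rcases h' with h' | h' | h' | h' | h' | h' | h' | h' | h' | h' | h' | h' <;>
      · rw [ht, h']; decide

-- the char-level equivalence for A's any-expression
theorem pvA_iff (s : List Char) :
    pvProtocolBasesA.any (fun base =>
        s == base || s == base ++ [':'] || s == base ++ [':', '/', '/']) = true ↔
      ∃ b ∈ pvProtocolBasesA, s = b ∨ s = b ++ [':'] ∨ s = b ++ [':', '/', '/'] := by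
  simp [List.any_eq_true, or_assoc]

-- the two ports agree
theorem pv_main (url : String) :
    linkify_url_should_be_ignored_py url = linkify_url_should_be_ignored_py_alt url := by
  unfold linkify_url_should_be_ignored_py linkify_url_should_be_ignored_py_alt
  simp only [PySem.Str.endswith_eq]
  simp only [show (":" : String).toList = [':'] from rfl,
    show ("://" : String).toList = [':', '/', '/'] from rfl]
  by_cases h3 : PySem.Chars.endswith url.toList [':', '/', '/'] = true
  · obtain ⟨t, ht⟩ := (PySem.Chars.endswith_iff url.toList _).mp h3
    rw [if_pos h3, Bool.eq_iff_iff, pvA_iff, pvSet_mem]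
    have hsl : (PySem.Str.slice url none (some (-3))).toList
        = PySem.List.slice url.toList none (some (-3)) := by
      simp [PySem.Str.toList_slice]
    rw [hsl, PySem.List.slice_to_neg_ofNat _ 3 (by omega), ← ht]
    have hlen : (t ++ [':', '/', '/']).length - 3 = t.length := by simp
    rw [hlen, List.take_left]
    constructor
    · rintro ⟨b, hb, h | h | h⟩
      · exact absurd (h ▸ (List.mem_append_right t (by simp))) (pvBases_clean b hb).2
      · have := congrArg List.reverse h
        simp [List.reverse_append] at this
      · exact (List.append_cancel_right h) ▸ hb
    · intro htm; exact ⟨t, htm, Or.inr (Or.inr rfl)⟩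
  · by_cases h1 : PySem.Chars.endswith url.toList [':'] = true
    · obtain ⟨t, ht⟩ := (PySem.Chars.endswith_iff url.toList _).mp h1
      have h3' := h3
      rw [← ht] at h3'
      rw [if_neg h3, if_pos h1, Bool.eq_iff_iff, pvA_iff, pvSet_mem]
      have hsl : (PySem.Str.slice url none (some (-1))).toList
          = PySem.List.slice url.toList none (some (-1)) := by
        simp [PySem.Str.toList_slice]
      rw [hsl, PySem.List.slice_to_neg_one, ← ht, List.dropLast_concat]
      constructor
      · rintro ⟨b, hb, h | h | h⟩
        · exact absurd (h ▸ (List.mem_append_right t (by simp))) (pvBases_clean b hb).1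
        · exact (List.append_cancel_right h) ▸ hb
        · exact absurd ((PySem.Chars.endswith_iff _ _).mpr ⟨b, h.symm⟩) h3'
      · intro htm; exact ⟨t, htm, Or.inr (Or.inl rfl)⟩
    · rw [if_neg h3, if_neg h1, Bool.eq_iff_iff, pvA_iff, pvSet_mem]
      constructor
      · rintro ⟨b, hb, h | h | h⟩
        · exact h ▸ hb
        · exact absurd ((PySem.Chars.endswith_iff _ _).mpr ⟨b, h.symm⟩) h1
        · exact absurd ((PySem.Chars.endswith_iff _ _).mpr ⟨b, h.symm⟩) h3
      · intro hs; exact ⟨url.toList, hs, Or.inl rfl⟩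

-- ===== VERDICT (by name: the statement is the Claim_ definition above) =====
theorem linkify_url_should_be_ignored_py_spec : Claim_equal_linkify_url_should_be_ignored_py := by
  intro url _
  exact (pv_main url).symm ▸ rfl
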